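-- pv_equiv track=rewrite | github.com/alexandrastefan02/Simple-Lisp-Interpreter | Regex.py | remove_spaces_except_after_backslash
-- ===== SOURCE A (Python) =====
-- def remove_spaces_except_after_backslash(input_str):
--     result = ""
--     is_backslash = False
--
--     for char in input_str:
--         if char == ' ' and not is_backslash:
--             continue
--         result += char
--         is_backslash = (char == '\\')
--
--     return result
-- ===== SOURCE B (Python) =====
-- import re
--
-- def remove_spaces_except_after_backslash(input_str):
--     # One regex substitution: drop every ' ' not immediately preceded by '\' in the original string.
--     return re.sub(r'(?<!\\) ', '', input_str)
-- ===== Notes on version B (the rewrite author's own statement) =====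
-- stated objective: idiomatic
-- what changed: Replaced the stateful character loop and is_backslash flag with a single regex substitution using a negative lookbehind that removes exactly the spaces not preceded by a backslash; the scan runs in the C regex engine instead of a per-character Python loop with string concatenation.
import Mathlib
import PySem

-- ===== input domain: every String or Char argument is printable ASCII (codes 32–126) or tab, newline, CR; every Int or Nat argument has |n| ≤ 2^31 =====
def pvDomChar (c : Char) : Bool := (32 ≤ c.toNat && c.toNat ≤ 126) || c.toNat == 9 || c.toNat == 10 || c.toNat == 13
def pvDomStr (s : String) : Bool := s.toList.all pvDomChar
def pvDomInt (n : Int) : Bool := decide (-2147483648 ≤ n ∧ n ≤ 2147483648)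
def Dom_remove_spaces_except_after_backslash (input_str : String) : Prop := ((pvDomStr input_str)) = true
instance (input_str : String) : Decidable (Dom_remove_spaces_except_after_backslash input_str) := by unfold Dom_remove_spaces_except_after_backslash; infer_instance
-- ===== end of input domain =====

-- B replaces A's stateful flag loop with a regex substitution re.sub(r'(?<!\\) ', '', s) (idiomatic, same cost).
-- ===== PORT A =====
-- state: (result so far, is_backslash flag), exactly A's loop
def pvAStep (st : List Char × Bool) (c : Char) : List Char × Bool :=
  if c = ' ' ∧ st.2 = false then st
  else (st.1 ++ [c], decide (c = '\\'))

def remove_spaces_except_after_backslash (input_str : String) : String :=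
  String.mk (input_str.toList.foldl pvAStep ([], false)).1

-- ===== PORT B =====
-- Hand port of re.sub(r'(?<!\\) ', '', input_str): the pattern is a single literal space with a
-- negative lookbehind reading the ORIGINAL string, so the scan keeps a character unless it is a
-- space whose immediate predecessor in the input is not a backslash. Exact for this pattern.
def pvBGo (prev : Option Char) : List Char → List Char
  | [] => []
  | c :: rest =>
      if c = ' ' ∧ prev ≠ some '\\' then pvBGo (some c) rest
      else c :: pvBGo (some c) rest

def remove_spaces_except_after_backslash_alt (input_str : String) : String :=
  String.mk (pvBGo none input_str.toList)

-- ===== PRECONDITION & SPEC =====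
def Spec_remove_spaces_except_after_backslash (input_str : String) (out : String) : Prop := out = remove_spaces_except_after_backslash_alt input_str
instance (input_str : String) (out : String) : Decidable (Spec_remove_spaces_except_after_backslash input_str out) := by unfold Spec_remove_spaces_except_after_backslash; infer_instance

-- ===== CLAIM (what is proved, stated in full; the proofs are below) =====
def Claim_equal_remove_spaces_except_after_backslash : Prop := ∀ (input_str : String), Dom_remove_spaces_except_after_backslash input_str → Spec_remove_spaces_except_after_backslash input_str (remove_spaces_except_after_backslash input_str)

-- ===== LEMMAS AND PROOFS =====

-- A's flag after processing a prefix equals "the previous original character is a backslash".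
theorem pvFoldl_eq_go (l : List Char) : ∀ (acc : List Char) (prev : Option Char),
    (l.foldl pvAStep (acc, prev == some '\\')).1 = acc ++ pvBGo prev l := by
  induction l with
  | nil => intro acc prev; simp [pvBGo]
  | cons c rest ih =>
    intro acc prev
    by_cases h : c = ' ' ∧ prev ≠ some '\\'
    · have hf : (prev == some '\\') = false := by simpa using h.2
      simp only [List.foldl_cons, pvAStep, hf, h.1, pvBGo]
      simpa [h.2] using ih acc (some ' ')
    · have hkeep : ¬ (c = ' ' ∧ (prev == some '\\') = false) := by
        intro ⟨h1, h2⟩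
        exact h ⟨h1, by simpa using h2⟩
      simp only [List.foldl_cons, pvAStep, if_neg hkeep, pvBGo]
      rw [if_neg h]
      have hd : decide (c = '\\') = (some c == some '\\') := by
        by_cases hc : c = '\\' <;> simp [hc]
      rw [hd, ih (acc ++ [c]) (some c)]
      simp

-- ===== VERDICT (by name: the statement is the Claim_ definition above) =====
theorem remove_spaces_except_after_backslash_spec : Claim_equal_remove_spaces_except_after_backslash := by
  intro s _
  unfold Spec_remove_spaces_except_after_backslash
  unfold remove_spaces_except_after_backslash remove_spaces_except_after_backslash_alt
  have := pvFoldl_eq_go s.toList [] none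
  simp at this
  rw [this]
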